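-- pv_equiv track=rewrite | github.com/WuTheFWasThat/send-a-damned-message | send_a_damned_message.py | ordered_cyclic_permute_3
-- ===== SOURCE A (Python) =====
-- def ordered_cyclic_permute_3(x):
--     n = len(x)
--     n3 = (n // 3) * 3
--     newchars = [l for l in x]
--     for i in range(0, n3 // 3):
--         ind_1 = i
--         ind_2 = n3 // 3 + i
--         ind_3 = 2 * n3 // 3 + i
--         if i % 2 == 1:
--             ind_2, ind_3 = ind_3, ind_2
--         newchars[ind_1] = x[ind_2]
--         newchars[ind_2] = x[ind_3]
--         newchars[ind_3] = x[ind_1]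
--     return ''.join(newchars)
-- ===== SOURCE B (Python) =====
-- def ordered_cyclic_permute_3(x):
--     m = len(x) // 3
--     a, b, c = x[:m], x[m:2 * m], x[2 * m:3 * m]
--     return _riffle(b, c) + _riffle(c, a) + _riffle(a, b) + x[3 * m:]
--
--
-- def _riffle(u, v):
--     out = ''.join(p + q for p, q in zip(u[::2], v[1::2]))
--     return out + u[-1] if len(u) % 2 else out
-- ===== Notes on version B (the rewrite author's own statement) =====
-- stated objective: alternative
-- what changed: Replaces A's single in-place scatter loop (three index writes per iteration into a mutable char-list copy) by slicing the string into three thirds and rebuilding each output block as a riffle that zips the step-2 strided slices u[::2] and v[1::2] of two thirds, with no per-index loop or index arithmetic.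
import Mathlib
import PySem

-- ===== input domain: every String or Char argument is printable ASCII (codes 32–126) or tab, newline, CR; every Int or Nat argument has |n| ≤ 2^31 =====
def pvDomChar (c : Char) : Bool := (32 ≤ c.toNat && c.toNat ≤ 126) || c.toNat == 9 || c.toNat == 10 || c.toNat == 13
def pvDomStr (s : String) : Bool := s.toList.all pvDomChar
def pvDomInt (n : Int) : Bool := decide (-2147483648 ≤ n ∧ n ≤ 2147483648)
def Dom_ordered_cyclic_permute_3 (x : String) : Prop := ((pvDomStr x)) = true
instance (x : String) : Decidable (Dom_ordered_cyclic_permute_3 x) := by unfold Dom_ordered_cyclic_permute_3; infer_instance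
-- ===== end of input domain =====

set_option maxHeartbeats 1000000


-- B replaces A's in-place index-scatter loop by slicing the string into thirds and re-joining
-- pairs of thirds with a strided-slice zip riffle; objective: alternative decomposition.

-- ===== PORT A =====
-- loop body of A: the three list writes of one iteration; all indices are < len(x), so
-- List.set and List.getD with default are exact for Python's in-range assignment/read.
def pvStepA (l : List Char) (n3 : Nat) (s : List Char) (i : Nat) : List Char :=
  let ind1 := i
  let ind2 := if i % 2 = 1 then 2 * n3 / 3 + i else n3 / 3 + i
  let ind3 := if i % 2 = 1 then n3 / 3 + i else 2 * n3 / 3 + i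
  ((s.set ind1 (l.getD ind2 ' ')).set ind2 (l.getD ind3 ' ')).set ind3 (l.getD ind1 ' ')

def ordered_cyclic_permute_3 (x : String) : String :=
  let l := x.toList
  let n := l.length
  let n3 := (n / 3) * 3
  String.mk ((List.range (n3 / 3)).foldl (pvStepA l n3) l)

-- ===== PORT B =====
-- u[::2] (every second element starting at index 0): hand port, exact by the definition of
-- Python's step-2 slice.
def pvStride2 : List Char → List Char
  | [] => []
  | [a] => [a]
  | a :: _ :: t => a :: pvStride2 t

-- _riffle(u, v): zip(u[::2], v[1::2]) joined pairwise, plus u[-1] if len(u) is odd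
-- (u is nonempty there, so List.getD at len-1 is exact for Python's u[-1]).
def pvRiffle (u v : List Char) : List Char :=
  let out := ((pvStride2 u).zip (pvStride2 (v.drop 1))).flatMap (fun pq => [pq.1, pq.2])
  if u.length % 2 = 1 then out ++ [u.getD (u.length - 1) ' '] else out

-- x[i:j] with 0 ≤ i ≤ j: (drop i).take (j-i), exact for nonnegative in-order slices.
def ordered_cyclic_permute_3_alt (x : String) : String :=
  let l := x.toList
  let m := l.length / 3
  let a := l.take m
  let b := (l.drop m).take m
  let c := (l.drop (2 * m)).take m
  String.mk (pvRiffle b c ++ pvRiffle c a ++ pvRiffle a b ++ l.drop (3 * m))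

-- ===== PRECONDITION & SPEC =====
def Spec_ordered_cyclic_permute_3 (x : String) (out : String) : Prop := out = ordered_cyclic_permute_3_alt x
instance (x : String) (out : String) : Decidable (Spec_ordered_cyclic_permute_3 x out) := by unfold Spec_ordered_cyclic_permute_3; infer_instance

-- ===== CLAIM (what is proved, stated in full; the proofs are below) =====
def Claim_equal_ordered_cyclic_permute_3 : Prop := ∀ (x : String), Dom_ordered_cyclic_permute_3 x → Spec_ordered_cyclic_permute_3 x (ordered_cyclic_permute_3 x)

-- ===== LEMMAS AND PROOFS =====

-- the intended content of position j after the first k loop iterations of A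
def pvF (l : List Char) (m k : Nat) (j : Nat) : Char :=
  if j < k then (if j % 2 = 1 then l.getD (2*m+j) ' ' else l.getD (m+j) ' ')
  else if m ≤ j ∧ j < m + k then (if (j-m) % 2 = 1 then l.getD (j-m) ' ' else l.getD (2*m+(j-m)) ' ')
  else if 2*m ≤ j ∧ j < 2*m + k then (if (j-2*m) % 2 = 1 then l.getD (m+(j-2*m)) ' ' else l.getD (j-2*m) ' ')
  else l.getD j ' '

lemma pv_map_range_getD (l : List Char) : (List.range l.length).map (fun j => l.getD j ' ') = l := by
  apply List.ext_getElem (by simp)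
  intro i h1 h2
  simp [List.getD_eq_getElem?_getD, h2]

lemma pv_set_map_range {f : Nat → Char} {n p : Nat} (c : Char) (_hp : p < n) :
    ((List.range n).map f).set p c = (List.range n).map (fun j => if j = p then c else f j) := by
  apply List.ext_getElem (by simp)
  intro i h1 h2
  simp only [List.getElem_set, List.getElem_map, List.getElem_range]
  by_cases h : p = i
  · simp [h]
  · rw [if_neg h, if_neg (fun hh => h hh.symm)]

lemma pvF_zero (l : List Char) (m : Nat) :
    (List.range l.length).map (pvF l m 0) = l := by
  have h : ∀ j ∈ List.range l.length, pvF l m 0 j = l.getD j ' ' := by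
    intro j _
    unfold pvF
    split_ifs <;> first | rfl | omega
  rw [List.map_congr_left h, pv_map_range_getD]

lemma pv_inv (l : List Char) (k : Nat) (hk : k ≤ l.length / 3) :
    (List.range k).foldl (pvStepA l (l.length / 3 * 3)) l
      = (List.range l.length).map (pvF l (l.length / 3) k) := by
  induction k with
  | zero =>
      simp only [List.range_zero, List.foldl_nil]
      exact (pvF_zero l _).symm
  | succ k ih =>
      have hk' : k ≤ l.length / 3 := by omega
      rw [List.range_succ, List.foldl_append, List.foldl_cons, List.foldl_nil, ih hk']
      set n := l.length with hn
      set m := n / 3 with hm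
      have h3 : m * 3 / 3 = m := by omega
      have h23 : 2 * (m * 3) / 3 = 2 * m := by omega
      have h3m : 3 * m ≤ n := by omega
      have hkm : k < m := by omega
      simp only [pvStepA]
      rw [h3, h23]
      by_cases hp : k % 2 = 1
      · rw [if_pos hp, if_pos hp,
          pv_set_map_range _ (by omega), pv_set_map_range _ (by omega),
          pv_set_map_range _ (by omega)]
        apply List.map_congr_left
        intro j hj
        have hjn : j < n := List.mem_range.mp hj
        unfold pvF
        split_ifs <;> first | omega | (congr 1 <;> omega)
      · rw [if_neg hp, if_neg hp,
          pv_set_map_range _ (by omega), pv_set_map_range _ (by omega),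
          pv_set_map_range _ (by omega)]
        apply List.map_congr_left
        intro j hj
        have hjn : j < n := List.mem_range.mp hj
        unfold pvF
        split_ifs <;> first | omega | (congr 1 <;> omega)

lemma pv_stride2_cons (c : Char) (t : List Char) :
    pvStride2 (c :: t) = c :: pvStride2 (t.drop 1) := by
  cases t <;> simp [pvStride2]

-- the riffle of two equal-length lists, position by position
lemma pv_riffle_char : ∀ (u v : List Char), u.length = v.length →
    pvRiffle u v = (List.range u.length).map
      (fun j => if j % 2 = 1 then v.getD j ' ' else u.getD j ' ')
  | [], [], _ => by simp [pvRiffle, pvStride2]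
  | [a], [b], _ => by
      simp [pvRiffle, pvStride2, List.range_succ, List.getD]
  | a :: a' :: u', b :: b' :: v', h => by
      have h' : u'.length = v'.length := by simpa using h
      have ih := pv_riffle_char u' v' h'
      simp only [pvRiffle] at ih ⊢
      rw [show pvStride2 (a :: a' :: u') = a :: pvStride2 u' from by simp [pvStride2],
          show (b :: b' :: v').drop 1 = b' :: v' from rfl, pv_stride2_cons]
      simp only [List.zip_cons_cons, List.flatMap_cons, List.length_cons]
      have hrange : List.range (u'.length + 1 + 1)
          = 0 :: 1 :: (List.range u'.length).map (fun j => j + 2) := by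
        rw [List.range_succ_eq_map, List.range_succ_eq_map]
        simp only [List.map_cons, List.map_map]
        refine congrArg _ (congrArg _ ?_)
        apply List.map_congr_left
        intro j _
        simp only [Function.comp_apply]
      rw [hrange, List.map_cons, List.map_cons, List.map_map]
      have hmap : (List.range u'.length).map
            ((fun j => if j % 2 = 1 then (b :: b' :: v').getD j ' '
                       else (a :: a' :: u').getD j ' ') ∘ (fun j => j + 2))
          = (List.range u'.length).map
            (fun j => if j % 2 = 1 then v'.getD j ' ' else u'.getD j ' ') := by
        apply List.map_congr_left
        intro j _
        have hm : (j + 2) % 2 = j % 2 := by omega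
        simp only [Function.comp, hm, List.getD_cons_succ]
      rw [hmap]
      have hmod : (u'.length + 1 + 1) % 2 = u'.length % 2 := by omega
      rw [hmod]
      by_cases hp : u'.length % 2 = 1
      · rw [if_pos hp] at ih ⊢
        rw [← ih]
        have h1 : u'.length + 1 + 1 - 1 = (u'.length - 1) + 1 + 1 := by omega
        rw [h1]
        simp [List.getD]
      · rw [if_neg hp] at ih ⊢
        rw [← ih]
        simp [List.getD]
  termination_by u v _ => u.length

lemma pv_getD_append (xs ys : List Char) (j : Nat) (d : Char) :
    (xs ++ ys).getD j d = if j < xs.length then xs.getD j d else ys.getD (j - xs.length) d := by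
  by_cases h : j < xs.length
  · simp [h, List.getD_eq_getElem?_getD, List.getElem?_append_left]
  · simp [h, List.getD_eq_getElem?_getD, List.getElem?_append_right (by omega : xs.length ≤ j)]

lemma pv_getD_map_range (f : Nat → Char) {n j : Nat} (h : j < n) (d : Char) :
    ((List.range n).map f).getD j d = f j := by
  simp [List.getD_eq_getElem?_getD, h]

lemma pv_getD_drop (l : List Char) (k i : Nat) (d : Char) :
    (l.drop k).getD i d = l.getD (k + i) d := by
  simp [List.getD_eq_getElem?_getD, List.getElem?_drop]

lemma pv_getD_slice (l : List Char) (k m i : Nat) (h : i < m) :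
    ((l.drop k).take m).getD i ' ' = l.getD (k + i) ' ' := by
  simp [List.getD_eq_getElem?_getD, h, List.getElem?_drop]

lemma pv_ext_getD {l1 l2 : List Char} (h : l1.length = l2.length)
    (h2 : ∀ j, j < l1.length → l1.getD j ' ' = l2.getD j ' ') : l1 = l2 := by
  apply List.ext_getElem h
  intro i h1 h1'
  have := h2 i h1
  rwa [List.getD_eq_getElem _ _ h1, List.getD_eq_getElem _ _ h1'] at this

lemma pv_riffle_slices (l : List Char) (k1 k2 m : Nat) (h1 : k1 + m ≤ l.length) (h2 : k2 + m ≤ l.length) :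
    pvRiffle ((l.drop k1).take m) ((l.drop k2).take m)
      = (List.range m).map (fun i => if i % 2 = 1 then l.getD (k2 + i) ' ' else l.getD (k1 + i) ' ') := by
  have hl1 : ((l.drop k1).take m).length = m := by simp; omega
  have hl2 : ((l.drop k2).take m).length = m := by simp; omega
  rw [pv_riffle_char _ _ (hl1.trans hl2.symm), hl1]
  apply List.map_congr_left
  intro i hi
  have hi' : i < m := List.mem_range.mp hi
  rw [pv_getD_slice _ _ _ _ hi', pv_getD_slice _ _ _ _ hi']

-- ===== VERDICT (by name: the statement is the Claim_ definition above) =====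
theorem ordered_cyclic_permute_3_spec : Claim_equal_ordered_cyclic_permute_3 := by
  intro x _
  unfold Spec_ordered_cyclic_permute_3 ordered_cyclic_permute_3 ordered_cyclic_permute_3_alt
  simp only []
  set l := x.toList with hl
  set n := l.length with hn
  set m := n / 3 with hm
  have h3m : 3 * m ≤ n := by omega
  rw [show (n / 3) * 3 / 3 = m from by omega]
  rw [pv_inv l m (le_refl _)]
  rw [show l.take m = (l.drop 0).take m from by rw [List.drop_zero]]
  rw [pv_riffle_slices l m (2*m) m (by omega) (by omega),
      pv_riffle_slices l (2*m) 0 m (by omega) (by omega),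
      pv_riffle_slices l 0 m m (by omega) (by omega)]
  congr 1
  apply pv_ext_getD
  · simp only [List.length_map, List.length_range, List.length_append, List.length_drop]
    omega
  · intro j hj
    have hjn : j < n := by simpa using hj
    rw [pv_getD_map_range _ hjn]
    rw [pv_getD_append, pv_getD_append, pv_getD_append, pv_getD_drop]
    simp only [List.length_map, List.length_range, List.length_append]
    unfold pvF
    split_ifs <;>
      first
        | omega
        | (congr 1 <;> omega)
        | (rw [pv_getD_map_range _ (by omega)]; split_ifs <;> first | omega | (congr 1 <;> omega))
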